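-- pv_equiv track=rewrite | github.com/snalahi/Python-Functions-Files-and-Dictionaries | while_loop_challenge.py | beginning
-- ===== SOURCE A (Python) =====
-- def beginning(a_list):
--   i = 0
--   while i < len(a_list):
--     if a_list[i] == 'bye':
--       if i == 0:
--         return []
--       elif i < 10:
--         return a_list[:i]
--       else:
--         break
--     i += 1
--   return a_list[:10]
-- ===== SOURCE B (Python) =====
-- def beginning(a_list):
--   prefix = a_list[:10]
--   if 'bye' in prefix:
--     return prefix[:prefix.index('bye')]
--   return prefix
-- ===== Notes on version B (the rewrite author's own statement) =====
-- stated objective: simpler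
-- what changed: B caps the list first with a closed-form slice a_list[:10] and then cuts at 'bye' with a single membership/index step on that bounded window, instead of A's element-by-element while loop interleaving the index-vs-10 check with the scan; the slice avoids A's per-element Python-level iteration on long bye-free lists.
import Mathlib
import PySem

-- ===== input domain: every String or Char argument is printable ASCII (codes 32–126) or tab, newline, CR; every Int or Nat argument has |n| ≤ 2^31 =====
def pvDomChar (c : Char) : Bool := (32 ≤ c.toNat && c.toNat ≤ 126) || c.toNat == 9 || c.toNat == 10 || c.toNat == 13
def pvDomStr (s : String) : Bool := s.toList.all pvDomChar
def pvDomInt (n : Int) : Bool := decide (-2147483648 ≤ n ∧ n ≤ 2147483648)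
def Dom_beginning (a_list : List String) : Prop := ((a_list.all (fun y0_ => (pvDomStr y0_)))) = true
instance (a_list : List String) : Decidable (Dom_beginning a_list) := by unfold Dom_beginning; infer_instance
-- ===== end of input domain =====

-- B caps first with a closed-form slice a_list[:10], then cuts at 'bye' in that bounded window; simpler decomposition, same return value.


-- ===== PORT A =====
-- while i < len(a_list): check a_list[i] == 'bye', ported as structural recursion on the index i
def beginningLoop (a_list : List String) (i : Nat) : List String :=
  if h : i < a_list.length then
    if a_list[i] = "bye" then
      if i = 0 then []
      else if i < 10 then PySem.List.slice a_list none (some (i : Int))   -- a_list[:i]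
      else PySem.List.slice a_list none (some 10)                         -- break → a_list[:10]
    else beginningLoop a_list (i + 1)
  else PySem.List.slice a_list none (some 10)
termination_by a_list.length - i

def beginning (a_list : List String) : List String := beginningLoop a_list 0

-- ===== PORT B =====
def beginning_alt (a_list : List String) : List String :=
  let pfx := PySem.List.slice a_list none (some 10)        -- a_list[:10]
  match PySem.List.index? pfx "bye" with                   -- 'bye' in pfx / pfx.index('bye')
  | some k => PySem.List.slice pfx none (some (k : Int))   -- pfx[:k]
  | none => pfx

-- ===== PRECONDITION & SPEC =====
def Spec_beginning (a_list : List String) (out : List String) : Prop := out = beginning_alt a_list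
instance (a_list : List String) (out : List String) : Decidable (Spec_beginning a_list out) := by unfold Spec_beginning; infer_instance

-- ===== CLAIM (what is proved, stated in full; the proofs are below) =====
def Claim_equal_beginning : Prop := ∀ (a_list : List String), Dom_beginning a_list → Spec_beginning a_list (beginning a_list)

-- ===== LEMMAS AND PROOFS =====

lemma slice10 (xs : List String) : PySem.List.slice xs none (some 10) = xs.take 10 := by
  have h := PySem.List.slice_to (xs := xs) (b := 10) (by norm_num)
  simpa using h

-- B's value when the first occurrence of "bye" in the list is at index i < 10
lemma alt_of_first_bye (l : List String) (i : Nat) (hi : i < l.length) (h10 : i < 10)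
    (hv : l[i] = "bye") (hfst : ∀ j (_ : j < i) (hj : j < l.length), l[j] ≠ "bye") :
    beginning_alt l = l.take i := by
  have hidx : (l.take 10).idxOf? "bye" = some i := by
    rw [List.idxOf?_eq_some_iff]
    refine ⟨by simp [List.length_take]; omega, ?_, ?_⟩
    · simpa [List.getElem_take] using hv
    · intro j hj
      have hjl : j < l.length := by omega
      simpa [List.getElem_take] using hfst j hj hjl
  simp only [beginning_alt, slice10, PySem.List.index?_eq_idxOf?, hidx,
    PySem.List.slice_to_natCast, List.take_take]
  congr 1
  omega

-- B's value when "bye" does not occur among the first min(10, len) elements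
lemma alt_of_no_bye (l : List String)
    (hno : ∀ j (_ : j < 10) (hj : j < l.length), l[j] ≠ "bye") :
    beginning_alt l = l.take 10 := by
  have hmem : "bye" ∉ l.take 10 := by
    intro hm
    obtain ⟨j, hj, hget⟩ := List.getElem_of_mem hm
    have hj10 : j < 10 := by have := List.length_take_le 10 l; omega
    have hjl : j < l.length := by
      have := hj; simp [List.length_take] at this; omega
    exact hno j hj10 hjl (by simpa [List.getElem_take] using hget)
  have hidx : (l.take 10).idxOf? "bye" = none := List.idxOf?_eq_none_iff.mpr hmem
  simp [beginning_alt, slice10, PySem.List.index?_eq_idxOf?, hidx]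

-- the loop invariant: if no "bye" occurs before index i, the loop from i computes B's value
lemma loop_eq_alt (l : List String) (i : Nat)
    (h : ∀ j (_ : j < i) (hj : j < l.length), l[j] ≠ "bye") :
    beginningLoop l i = beginning_alt l := by
  by_cases hi : i < l.length
  · by_cases hb : l[i] = "bye"
    · rw [beginningLoop]
      simp only [hi, dif_pos, hb, if_pos]
      by_cases h0 : i = 0
      · rw [if_pos h0, alt_of_first_bye l i hi (by omega) hb h, h0]
        simp
      · by_cases h10 : i < 10
        · rw [if_neg h0, if_pos h10, alt_of_first_bye l i hi h10 hb h,
            PySem.List.slice_to_natCast]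
        · rw [if_neg h0, if_neg h10,
            alt_of_no_bye l (fun j hj10 hjl => h j (by omega) hjl), slice10]
    · rw [beginningLoop]
      simp only [hi, dif_pos, hb, if_false]
      exact loop_eq_alt l (i + 1) (by
        intro j hj hjl
        rcases Nat.lt_succ_iff_lt_or_eq.mp hj with hlt | heq
        · exact h j hlt hjl
        · subst heq; exact hb)
  · rw [beginningLoop]
    simp only [hi, dif_neg, not_false_iff]
    rw [alt_of_no_bye l (fun j _ hjl => h j (by omega) hjl), slice10]
termination_by l.length - i
decreasing_by omega

-- ===== VERDICT (by name: the statement is the Claim_ definition above) =====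
theorem beginning_spec : Claim_equal_beginning := by
  intro l _
  unfold Spec_beginning beginning
  exact loop_eq_alt l 0 (by intro j hj _; omega)
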